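-- pv_equiv track=rewrite | github.com/Devdrm-osk931/Algorithm-Study | RealTests/2022skt/1.py | solution
-- ===== SOURCE A (Python) =====
-- def solution(logs, events):
--     answer = []
--     user_log_dict = dict()
--
--     for log in logs:
--         time, user, step = log.split()
--         if user not in user_log_dict:
--             user_log_dict[user] = [step]
--         else:
--             user_log_dict[user].append(step)
--
--     for user, steps in user_log_dict.items():
--         if len(steps) > len(events):
--             answer.append(user)
--         elif len(steps) == len(events):
--             if steps != events:
--                 answer.append(user)
--         else:
--             k = len(steps)
--             if steps != events[:k]:
--                 answer.append(user)
--
--     if not answer: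
--         answer.append("-1")
--     return sorted(answer)
-- ===== SOURCE B (Python) =====
-- def solution(logs, events):
--     # streaming compare: per user keep (count, valid) instead of accumulating steps
--     state = {}  # user -> (count, valid)
--     n = len(events)
--     for log in logs:
--         _time, user, step = log.split()
--         cnt, valid = state.get(user, (0, True))
--         state[user] = (cnt + 1, valid and cnt < n and events[cnt] == step)
--     bad = [u for u, (c, v) in state.items() if not v]
--     return sorted(bad) if bad else ["-1"]
-- ===== Notes on version B (the rewrite author's own statement) =====
-- stated objective: alternative
-- what changed: Replaces the accumulate-all-steps-then-prefix-compare pass with a single streaming pass that keeps only a (count, valid) pair per user, comparing each step against events[count] as it arrives.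
import Mathlib
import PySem

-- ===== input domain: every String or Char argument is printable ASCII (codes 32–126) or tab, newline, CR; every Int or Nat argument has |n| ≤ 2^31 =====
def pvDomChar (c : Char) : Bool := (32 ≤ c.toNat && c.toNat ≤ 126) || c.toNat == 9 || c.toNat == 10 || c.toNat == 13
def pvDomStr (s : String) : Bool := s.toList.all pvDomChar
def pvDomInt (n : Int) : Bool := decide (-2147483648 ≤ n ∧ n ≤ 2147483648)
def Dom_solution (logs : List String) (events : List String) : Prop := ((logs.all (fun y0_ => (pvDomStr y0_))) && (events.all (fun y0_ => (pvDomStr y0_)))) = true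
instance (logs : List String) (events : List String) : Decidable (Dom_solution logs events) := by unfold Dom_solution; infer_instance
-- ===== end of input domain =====

-- B is an alternative single-pass algorithm: per-user (count, valid) state instead of accumulating
-- each user's step list and comparing it with a prefix of events afterwards.

-- ===== PORT A =====
-- 'time, user, step = log.split()' (Pre_ guarantees exactly 3 fields; getD defaults are unreachable there)
def pvUser (log : String) : String := (PySem.Str.split₀ log).getD 1 ""
def pvStep (log : String) : String := (PySem.Str.split₀ log).getD 2 ""

-- loop body of A's first loop: group steps per user (dict of lists, append in place)
def stepA (d : PySem.Dict String (List String)) (log : String) : PySem.Dict String (List String) :=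
  if d.contains (pvUser log) then d.modify (pvUser log) [] (· ++ [pvStep log])
  else d.insert (pvUser log) [pvStep log]

-- loop body of A's second loop: the three-branch comparison against events
def flagA (events : List String) (ans : List String) (p : String × List String) : List String :=
  if p.2.length > events.length then ans ++ [p.1]
  else if p.2.length = events.length then
    (if p.2 ≠ events then ans ++ [p.1] else ans)
  else
    (if p.2 ≠ PySem.List.slice events none (some (p.2.length : Int)) then ans ++ [p.1] else ans)

def solution (logs : List String) (events : List String) : List String :=
  let d := logs.foldl stepA PySem.Dict.empty
  let answer := d.items.foldl (flagA events) []
  let answer := if answer = [] then ["-1"] else answer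
  PySem.List.sorted answer (fun x => x) false

-- ===== PORT B =====
-- loop body of B's single pass: per-user (count, valid), compare the step against events[count]
def stepB (events : List String) (d : PySem.Dict String (Nat × Bool)) (log : String) :
    PySem.Dict String (Nat × Bool) :=
  let cv := d.getD (pvUser log) (0, true)
  d.insert (pvUser log)
    (cv.1 + 1, cv.2 && (decide (cv.1 < events.length) && (events.getD cv.1 "" == pvStep log)))

def solution_alt (logs : List String) (events : List String) : List String :=
  let st := logs.foldl (stepB events) PySem.Dict.empty
  let bad := st.items.foldl (fun acc p => if p.2.2 then acc else acc ++ [p.1]) []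
  if bad = [] then ["-1"] else PySem.List.sorted bad (fun x => x) false

-- ===== PRECONDITION & SPEC =====
-- Pre_ excludes exactly the logs on which 'time, user, step = log.split()' raises ValueError.
def Pre_solution (logs : List String) (events : List String) : Prop :=
  ∀ log ∈ logs, (PySem.Str.split₀ log).length = 3
instance (logs : List String) (events : List String) : Decidable (Pre_solution logs events) := by
  unfold Pre_solution; infer_instance
def pvWitness_solution : List String × List String :=
  (["10 alice start", "11 alice end", "12 bob end"], ["start", "end"])

def Spec_solution (logs : List String) (events : List String) (out : List String) : Prop := out = solution_alt logs events
instance (logs : List String) (events : List String) (out : List String) : Decidable (Spec_solution logs events out) := by unfold Spec_solution; infer_instance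

-- ===== CLAIM (what is proved, stated in full; the proofs are below) =====
def Claim_equal_solution : Prop := ∀ (logs : List String) (events : List String), Dom_solution logs events → Pre_solution logs events → Spec_solution logs events (solution logs events)

-- ===== LEMMAS AND PROOFS =====

-- B's one-step validity update computes "the steps seen so far are the matching prefix of events".
theorem step_valid (s e : List String) (x : String) :
    (decide (s = e.take s.length) && (decide (s.length < e.length) && (e.getD s.length "" == x)))
      = decide (s ++ [x] = e.take (s.length + 1)) := by
  rw [Bool.eq_iff_iff]
  simp only [Bool.and_eq_true, decide_eq_true_eq, beq_iff_eq]
  by_cases hl : s.length < e.length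
  · have ht : e.take (s.length + 1) = e.take s.length ++ [e[s.length]] := by
      rw [List.take_add_one, List.getElem?_eq_getElem hl]; rfl
    have hg : e.getD s.length "" = e[s.length] := by
      simp [List.getD, List.getElem?_eq_getElem hl]
    rw [ht, hg]
    constructor
    · rintro ⟨h1, _, h3⟩; rw [← h1, h3]
    · intro h
      have hlen : s.length = (e.take s.length).length := by simp [List.length_take, le_of_lt hl]
      obtain ⟨h1, h2⟩ := List.append_inj h hlen
      have : x = e[s.length] := by simpa using h2
      exact ⟨h1, hl, this.symm⟩
  · have h1 : e.take (s.length + 1) = e := List.take_of_length_le (by omega)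
    have h2 : s ++ [x] ≠ e := by
      intro h; apply hl; have := congrArg List.length h; simp at this; omega
    simp [h1, h2, hl]

-- Invariant relating the two per-user dictionaries during the pass over the logs.
def DictRel (events : List String) (dA : PySem.Dict String (List String))
    (dB : PySem.Dict String (Nat × Bool)) : Prop :=
  dA.keys = dB.keys ∧ dA.keys.Nodup ∧
  ∀ u, dB.getD u (0, true) = ((dA.getD u []).length, decide (dA.getD u [] = events.take (dA.getD u []).length))

theorem rel_step (events : List String) (log : String)
    (dA : PySem.Dict String (List String)) (dB : PySem.Dict String (Nat × Bool))
    (h : DictRel events dA dB) :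
    DictRel events (stepA dA log) (stepB events dB log) := by
  obtain ⟨hk, hnd, hv⟩ := h
  unfold stepA stepB
  set u := pvUser log
  set x := pvStep log
  have hc : dA.contains u = dB.contains u := by
    rw [PySem.Dict.contains_eq_decide_mem_keys, PySem.Dict.contains_eq_decide_mem_keys, hk]
  have hvu := hv u
  have hA : ∀ u', (if dA.contains u then dA.modify u [] (· ++ [x]) else dA.insert u [x]).getD u' []
      = if u' = u then dA.getD u [] ++ [x] else dA.getD u' [] := by
    intro u'
    by_cases hcu : dA.contains u = true
    · simp [hcu, PySem.Dict.getD_modify]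
    · have hnil : dA.getD u [] = [] := PySem.Dict.getD_of_not_contains _ _ (by simpa using hcu)
      simp [hcu, PySem.Dict.getD_insert, hnil]
  refine ⟨?_, ?_, ?_⟩
  · by_cases hcu : dA.contains u = true
    · rw [if_pos hcu, PySem.Dict.keys_modify,
        PySem.Dict.keys_insert_of_contains _ _ hcu,
        PySem.Dict.keys_insert_of_contains _ _ (hc ▸ hcu), hk]
    · rw [if_neg hcu,
        PySem.Dict.keys_insert_of_not_contains _ _ (by simpa using hcu),
        PySem.Dict.keys_insert_of_not_contains _ _ (by rw [← hc]; simpa using hcu), hk]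
  · by_cases hcu : dA.contains u = true
    · rw [if_pos hcu, PySem.Dict.keys_modify]
      exact PySem.Dict.nodup_keys_insert _ _ _ hnd
    · rw [if_neg hcu]
      exact PySem.Dict.nodup_keys_insert _ _ _ hnd
  · intro u'
    rw [hA u', PySem.Dict.getD_insert]
    by_cases he : u' = u
    · rw [if_pos he, if_pos he, hvu]
      simp only [Prod.mk.injEq]
      refine ⟨by simp, ?_⟩
      have hlen : (dA.getD u [] ++ [x]).length = (dA.getD u []).length + 1 := by simp
      rw [hlen]
      exact step_valid (dA.getD u []) events x
    · rw [if_neg he, if_neg he, hv u']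

theorem rel_foldl (events : List String) (logs : List String)
    (dA : PySem.Dict String (List String)) (dB : PySem.Dict String (Nat × Bool))
    (h : DictRel events dA dB) :
    DictRel events (logs.foldl stepA dA) (logs.foldl (stepB events) dB) := by
  induction logs generalizing dA dB with
  | nil => exact h
  | cons log rest ih => exact ih _ _ (rel_step events log dA dB h)

theorem ite_ne_flip {a b : List String} {x y : List String} :
    (if a ≠ b then x else y) = if a = b then y else x := by
  by_cases h : a = b <;> simp [h]

-- A's three-branch flag condition collapses to one prefix comparison.
theorem flagA_eq (events : List String) (ans : List String) (p : String × List String) :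
    flagA events ans p = if p.2 = events.take p.2.length then ans else ans ++ [p.1] := by
  unfold flagA
  rcases lt_trichotomy p.2.length events.length with hl | hl | hl
  · rw [if_neg (by omega), if_neg (by omega),
      PySem.List.slice_to_natCast, ite_ne_flip]
  · have ht : events.take p.2.length = events := List.take_of_length_le (by omega)
    rw [if_neg (by omega), if_pos hl, ht, ite_ne_flip]
  · have ht : events.take p.2.length = events := List.take_of_length_le (by omega)
    have hne : p.2 ≠ events.take p.2.length := by
      rw [ht]; intro h; have := congrArg List.length h; omega
    rw [if_pos (by omega), if_neg hne]

-- the two final expressions: A sorts after the '-1' substitution, B before it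
theorem sorted_ite (l : List String) :
    PySem.List.sorted (if l = [] then ["-1"] else l) (fun x => x) false
      = if l = [] then ["-1"] else PySem.List.sorted l (fun x => x) false := by
  by_cases h : l = []
  · rw [if_pos h, if_pos h]; rfl
  · rw [if_neg h, if_neg h]

theorem solution_eq_alt (logs events : List String) : solution logs events = solution_alt logs events := by
  simp only [solution, solution_alt]
  obtain ⟨hk, hnd, hv⟩ :=
    rel_foldl events logs PySem.Dict.empty PySem.Dict.empty
      ⟨rfl, by simp [PySem.Dict.keys_empty], fun u => by simp [PySem.Dict.getD_empty]⟩
  set dA := logs.foldl stepA PySem.Dict.empty with hdA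
  set dB := logs.foldl (stepB events) PySem.Dict.empty with hdB
  have hndB : dB.keys.Nodup := hk ▸ hnd
  rw [PySem.Dict.items_eq_map_keys dA hnd [],
      PySem.Dict.items_eq_map_keys dB hndB (0, true),
      List.foldl_map, List.foldl_map, ← hk]
  have hfold :
      (fun (ans : List String) (k : String) => flagA events ans (k, dA.getD k []))
      = (fun (acc : List String) (k : String) =>
          if ((k, dB.getD k (0, true)) : String × Nat × Bool).2.2 then acc else acc ++ [(k, dB.getD k (0, true)).1]) := by
    funext ans k
    rw [flagA_eq, hv k]
    simp only [decide_eq_true_eq]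
  rw [hfold]
  exact sorted_ite _

-- ===== VERDICT (by name: the statement is the Claim_ definition above) =====
theorem solution_spec : Claim_equal_solution := by
  intro logs events _ _
  exact solution_eq_alt logs events
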